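-- pv_equiv track=rewrite | github.com/GeraldLeeDoesThings/DayTradeAssist | utils.py | lookback
-- ===== SOURCE A (Python) =====
-- def lookback(data, distance):
--     out = []
--     for i in range(len(data)):
--         if i - distance < 0:
--             out.append(0)
--         else:
--             out.append(data[i])
--     return out
-- ===== SOURCE B (Python) =====
-- def lookback(data, distance):
--     z = max(0, min(len(data), distance))
--     return [0] * z + list(data[z:])
-- ===== Notes on version B (the rewrite author's own statement) =====
-- stated objective: simpler
-- what changed: Replaces the per-index loop-and-branch with computing the clamped zero-count z once and returning a zeros block plus a bulk slice copy.
import Mathlib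
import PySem

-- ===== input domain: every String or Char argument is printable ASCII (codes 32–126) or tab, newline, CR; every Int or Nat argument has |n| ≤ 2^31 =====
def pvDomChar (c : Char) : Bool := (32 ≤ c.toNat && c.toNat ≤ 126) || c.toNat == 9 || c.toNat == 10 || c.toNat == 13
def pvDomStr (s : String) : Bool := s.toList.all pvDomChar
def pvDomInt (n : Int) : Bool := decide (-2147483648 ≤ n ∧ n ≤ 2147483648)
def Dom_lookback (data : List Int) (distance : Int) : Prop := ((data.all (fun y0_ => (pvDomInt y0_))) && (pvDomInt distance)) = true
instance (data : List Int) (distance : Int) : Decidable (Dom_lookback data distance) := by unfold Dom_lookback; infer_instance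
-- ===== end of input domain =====

-- B replaces A's per-index loop-and-branch with a clamped zero-count: zeros block ++ tail slice (objective: simpler).

-- ===== PORT A =====
-- for i in range(len(data)): append 0 if i - distance < 0 else data[i]
-- data[i] is always in range (0 ≤ i < len), so List.getD i 0 is exact here.
def lookback (data : List Int) (distance : Int) : List Int :=
  (List.range data.length).foldl
    (fun out (i : Nat) => out ++ [if (i : Int) - distance < 0 then 0 else data.getD i 0]) []

-- ===== PORT B =====
-- z = max(0, min(len(data), distance)); [0]*z + data[z:]
def lookback_alt (data : List Int) (distance : Int) : List Int :=
  let z : Nat := (max 0 (min (data.length : Int) distance)).toNat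
  List.replicate z 0 ++ data.drop z

-- ===== PRECONDITION & SPEC =====
def Spec_lookback (data : List Int) (distance : Int) (out : List Int) : Prop := out = lookback_alt data distance
instance (data : List Int) (distance : Int) (out : List Int) : Decidable (Spec_lookback data distance out) := by unfold Spec_lookback; infer_instance

-- ===== CLAIM (what is proved, stated in full; the proofs are below) =====
def Claim_equal_lookback : Prop := ∀ (data : List Int) (distance : Int), Dom_lookback data distance → Spec_lookback data distance (lookback data distance)

-- ===== LEMMAS AND PROOFS =====

theorem pv_foldl_append_map {α β : Type} (f : α → β) (l : List α) (acc : List β) :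
    l.foldl (fun out i => out ++ [f i]) acc = acc ++ l.map f := by
  induction l generalizing acc with
  | nil => simp
  | cons x xs ih => simp [List.foldl_cons, ih]

theorem pv_lookback_eq_map (data : List Int) (distance : Int) :
    lookback data distance =
      (List.range data.length).map
        (fun (i : Nat) => if (i : Int) - distance < 0 then 0 else data.getD i 0) := by
  unfold lookback
  exact pv_foldl_append_map _ _ []

-- ===== VERDICT (by name: the statement is the Claim_ definition above) =====
theorem lookback_spec : Claim_equal_lookback := by
  intro data distance _
  unfold Spec_lookback lookback_alt
  rw [pv_lookback_eq_map]
  set z : Nat := (max 0 (min (data.length : Int) distance)).toNat with hz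
  have hzle : z ≤ data.length := by omega
  apply List.ext_getElem
  · simp [hzle]
  · intro i h1 h2
    have hi : i < data.length := by simpa using h1
    simp only [List.getElem_map, List.getElem_range]
    by_cases hlt : i < z
    · have : (i : Int) - distance < 0 := by omega
      rw [if_pos this, List.getElem_append_left (by simpa [hzle] using hlt)]
      simp
    · have hge : ¬ ((i : Int) - distance < 0) := by omega
      rw [if_neg hge, List.getElem_append_right (by simpa using hlt)]
      simp [List.getD_eq_getElem?_getD, List.getElem?_eq_getElem hi]
      have hzi : z + (i - z) = i := by omega
      simp [hzi]
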